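-- pv_equiv track=rewrite | github.com/jonathantsang/CompetitiveProgramming | binarysearchio/contest7/1.py | solve
-- ===== SOURCE A (Python) =====
-- def solve(s):
--     # Write your code here
--     idx = -1
--     side = 0 # 0 left, 1 right
--     left = True
--     right = True
--     for i, d in enumerate(s):
--         if side == 0 and d == 'B':
--             left = False
--         elif side == 1 and d == 'B':
--             right = False
--         if d == 'R':
--             side = 1
--     return left or right
-- ===== SOURCE B (Python) =====
-- def solve(s):
--     if 'R' not in s:
--         return True
--     i = s.index('R')
--     return 'B' not in s[:i] or 'B' not in s[i:]
-- ===== Notes on version B (the rewrite author's own statement) =====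
-- stated objective: simpler
-- what changed: Replaces A's single-pass state machine (side flag plus left/right flags mutated per character) with a direct decomposition: locate the first 'R' (no 'R' means True) and test 'B'-membership of the two segments it splits off.
import Mathlib
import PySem

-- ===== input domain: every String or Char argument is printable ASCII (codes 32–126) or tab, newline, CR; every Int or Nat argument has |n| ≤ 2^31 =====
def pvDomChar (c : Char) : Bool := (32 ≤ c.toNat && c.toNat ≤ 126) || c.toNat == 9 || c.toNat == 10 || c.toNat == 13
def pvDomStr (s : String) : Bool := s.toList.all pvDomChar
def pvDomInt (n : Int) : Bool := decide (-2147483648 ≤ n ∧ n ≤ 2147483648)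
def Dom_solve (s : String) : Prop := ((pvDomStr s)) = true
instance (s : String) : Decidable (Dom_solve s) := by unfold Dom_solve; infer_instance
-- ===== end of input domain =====

-- B replaces A's per-character state machine by locating the first 'R' and checking
-- 'B'-membership of the two segments it splits off; objective: simpler.

-- ===== PORT A =====
-- one loop step of A: state (side, left, right), input the enumerate pair (i, d)
def solveStep (st : Int × Bool × Bool) (p : Int × Char) : Int × Bool × Bool :=
  let side := st.1
  let left := st.2.1
  let right := st.2.2
  let lr : Bool × Bool :=
    if side == 0 && p.2 == 'B' then (false, right)
    else if side == 1 && p.2 == 'B' then (left, false)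
    else (left, right)
  let side' := if p.2 == 'R' then (1 : Int) else side
  (side', lr.1, lr.2)

def solve (s : String) : Bool :=
  let st := (PySem.List.enumerate s.toList 0).foldl solveStep (0, true, true)
  st.2.1 || st.2.2

-- ===== PORT B =====
def solve_alt (s : String) : Bool :=
  if !(PySem.Str.isIn "R" s) then true
  else
    let i := PySem.Str.find s "R"
    !(PySem.Str.isIn "B" (PySem.Str.slice s none (some i))) ||
    !(PySem.Str.isIn "B" (PySem.Str.slice s (some i) none))

-- ===== PRECONDITION & SPEC =====
def Spec_solve (s : String) (out : Bool) : Prop := out = solve_alt s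
instance (s : String) (out : Bool) : Decidable (Spec_solve s out) := by unfold Spec_solve; infer_instance

-- ===== CLAIM (what is proved, stated in full; the proofs are below) =====
def Claim_equal_solve : Prop := ∀ (s : String), Dom_solve s → Spec_solve s (solve s)

-- ===== LEMMAS AND PROOFS =====

-- evaluations of one loop step of A
theorem step_one (l r : Bool) (k : Int) (c : Char) :
    solveStep (1, l, r) (k, c) = (1, l, r && !(c == 'B')) := by
  by_cases hB : c = 'B' <;> simp [solveStep, hB, ite_self]

theorem step_zero_R (l r : Bool) (k : Int) :
    solveStep (0, l, r) (k, 'R') = (1, l, r) := by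
  simp [solveStep]

theorem step_zero_other (l r : Bool) (k : Int) (c : Char) (hR : c ≠ 'R') (hB : c ≠ 'B') :
    solveStep (0, l, r) (k, c) = (0, l, r) := by
  simp [solveStep, hR, hB]

theorem step_zero_B (l r : Bool) (k : Int) :
    solveStep (0, l, r) (k, 'B') = (0, false, r) := by
  simp [solveStep]

-- the enumerate index is never used by solveStep
theorem foldl_solveStep_enumerate (cs : List Char) (k : Int) (st : Int × Bool × Bool) :
    (PySem.List.enumerate cs k).foldl solveStep st =
      cs.foldl (fun st d => solveStep st (0, d)) st := by
  induction cs generalizing k st with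
  | nil => simp [PySem.List.enumerate]
  | cons c cs ih =>
      rw [PySem.List.enumerate_cons]
      simp only [List.foldl_cons]
      rw [ih]
      rfl

-- once side = 1, only the right flag can change, by scanning for 'B'
theorem foldl_side_one (cs : List Char) (l r : Bool) :
    cs.foldl (fun st d => solveStep st (0, d)) (1, l, r) =
      (1, l, r && !(cs.contains 'B')) := by
  induction cs generalizing r with
  | nil => simp
  | cons c cs ih =>
      simp only [List.foldl_cons, step_one, ih, List.contains_cons]
      by_cases hB : c = 'B'
      · subst hB; cases r <;> simp
      · have h1 : (c == 'B') = false := beq_eq_false_iff_ne.mpr hB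
        have h2 : ('B' == c) = false := beq_eq_false_iff_ne.mpr (Ne.symm hB)
        cases r <;> simp [h1, h2]

-- in side = 0, before any 'R' the left flag scans for 'B'; the first 'R' switches to side 1
theorem foldl_side_zero (cs : List Char) (l r : Bool) :
    cs.foldl (fun st d => solveStep st (0, d)) (0, l, r) =
      if 'R' ∈ cs then
        (1, l && !((cs.takeWhile (· ≠ 'R')).contains 'B'),
            r && !(((cs.dropWhile (· ≠ 'R')).tail).contains 'B'))
      else (0, l && !(cs.contains 'B'), r) := by
  induction cs generalizing l with
  | nil => simp
  | cons c cs ih =>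
      by_cases hR : c = 'R'
      · subst hR
        simp only [List.foldl_cons, step_zero_R, foldl_side_one, List.mem_cons, true_or,
          if_true, List.takeWhile, List.dropWhile]
        simp
      · by_cases hB : c = 'B'
        · subst hB
          simp only [List.foldl_cons, step_zero_B, ih]
          by_cases h : 'R' ∈ cs <;>
            simp [h, List.takeWhile, List.dropWhile, hR, Ne.symm hR]
        · simp only [List.foldl_cons, step_zero_other l r 0 c hR hB, ih]
          by_cases h : 'R' ∈ cs <;>
            simp [h, List.takeWhile, List.dropWhile, hR, Ne.symm hB, Ne.symm hR]

-- 'c in segment' for a single-character needle is list membership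
theorem isIn_singleton (c : Char) (cs : List Char) :
    PySem.Chars.isIn [c] cs = cs.contains c := by
  by_cases h : c ∈ cs
  · simp [(PySem.Chars.isIn_iff_infix [c] cs).mpr ((List.singleton_infix_iff c cs).mpr h), h]
  · simp [(PySem.Chars.isIn_eq_false_iff [c] cs).mpr
      (fun hin => h ((List.singleton_infix_iff c cs).mp hin)), h]

-- dropping the R-free prefix leaves the dropWhile part
theorem drop_length_takeWhile (p : Char → Bool) (l : List Char) :
    l.drop (l.takeWhile p).length = l.dropWhile p := by
  have h := List.takeWhile_append_dropWhile (p := p) (l := l)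
  calc l.drop (l.takeWhile p).length
      = (l.takeWhile p ++ l.dropWhile p).drop (l.takeWhile p).length := by rw [h]
    _ = l.dropWhile p := List.drop_left

-- if 'R' occurs in cs, the dropWhile part starts with 'R'
theorem dropWhile_cons_R (cs : List Char) (h : 'R' ∈ cs) :
    cs.dropWhile (· ≠ 'R') = 'R' :: (cs.dropWhile (· ≠ 'R')).tail := by
  have hne : cs.dropWhile (· ≠ 'R') ≠ [] := by
    intro hd
    have h' := h
    rw [← List.takeWhile_append_dropWhile (p := (· ≠ 'R')) (l := cs), hd, List.append_nil] at h'
    have hx := List.mem_takeWhile_imp h'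
    simp at hx
  have hhead := List.head_dropWhile_not (p := (fun x => decide (x ≠ 'R'))) (l := cs) hne
  have hh : (cs.dropWhile (· ≠ 'R')).head hne = 'R' := by simpa using hhead
  conv_lhs => rw [← List.cons_head_tail hne]
  rw [hh]

-- find cs ['R'] points at the first 'R': the length of the R-free prefix
theorem find_singleton_eq (cs : List Char) (h : 'R' ∈ cs) :
    PySem.Chars.find cs ['R'] = ((cs.takeWhile (· ≠ 'R')).length : Int) := by
  have hge : 0 ≤ PySem.Chars.find cs ['R'] :=
    (PySem.Chars.find_nonneg_iff cs ['R']).mpr ((List.singleton_infix_iff 'R' cs).mpr h)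
  obtain ⟨hpre, hmin⟩ := PySem.Chars.find_spec (s := cs) (sub := ['R']) hge
  set j := (PySem.Chars.find cs ['R']).toNat with hj
  set n := (cs.takeWhile (· ≠ 'R')).length with hn
  have hprefn : ['R'] <+: cs.drop n := by
    rw [hn, drop_length_takeWhile, dropWhile_cons_R cs h]
    exact ⟨_, rfl⟩
  have hjn : j ≤ n := by
    by_contra hlt
    exact hmin n (by omega) hprefn
  have hnj : n ≤ j := by
    by_contra hlt
    rw [not_le] at hlt
    obtain ⟨t, ht⟩ := hpre
    have hjget : cs[j]? = some 'R' := by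
      have h0 : (cs.drop j)[0]? = some 'R' := by rw [← ht]; rfl
      rw [List.getElem?_drop] at h0
      simpa using h0
    have hpreget : (cs.takeWhile (· ≠ 'R'))[j]? = some 'R' := by
      rw [show ((cs.takeWhile (· ≠ 'R'))[j]? = cs[j]?) by
        conv_rhs => rw [← List.takeWhile_append_dropWhile (p := (· ≠ 'R')) (l := cs)]
        rw [List.getElem?_append_left (by omega)]]
      exact hjget
    have hmem : 'R' ∈ cs.takeWhile (· ≠ 'R') := List.mem_of_getElem? hpreget
    have hx := List.mem_takeWhile_imp hmem
    simp at hx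
  omega

-- ===== VERDICT (by name: the statement is the Claim_ definition above) =====
theorem solve_spec : Claim_equal_solve := by
  intro s _
  unfold Spec_solve solve solve_alt
  rw [foldl_solveStep_enumerate, foldl_side_zero]
  have hRstr : PySem.Str.isIn "R" s = PySem.Chars.isIn ['R'] s.toList := rfl
  by_cases h : 'R' ∈ s.toList
  · have hin : PySem.Str.isIn "R" s = true := by
      rw [hRstr, isIn_singleton]; simpa using h
    have hfind : PySem.Str.find s "R" = ((s.toList.takeWhile (· ≠ 'R')).length : Int) := by
      have := find_singleton_eq s.toList h
      simpa [PySem.Str.find] using this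
    have htake : (PySem.Str.slice s none (some (PySem.Str.find s "R"))).toList
        = s.toList.takeWhile (· ≠ 'R') := by
      rw [hfind, PySem.Str.toList_slice, PySem.Chars.slice_eq_listSlice,
        PySem.List.slice_to _ (Int.natCast_nonneg _), Int.toNat_natCast]
      exact (List.prefix_iff_eq_take.mp (List.takeWhile_prefix _)).symm
    have hdrop : (PySem.Str.slice s (some (PySem.Str.find s "R")) none).toList
        = 'R' :: (s.toList.dropWhile (· ≠ 'R')).tail := by
      rw [hfind, PySem.Str.toList_slice, PySem.Chars.slice_eq_listSlice,
        PySem.List.slice_from _ (Int.natCast_nonneg _), Int.toNat_natCast,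
        drop_length_takeWhile]
      exact dropWhile_cons_R s.toList h
    have h1 : PySem.Str.isIn "B" (PySem.Str.slice s none (some (PySem.Str.find s "R")))
        = (s.toList.takeWhile (· ≠ 'R')).contains 'B' := by
      rw [show PySem.Str.isIn "B" (PySem.Str.slice s none (some (PySem.Str.find s "R")))
          = PySem.Chars.isIn ['B'] (PySem.Str.slice s none (some (PySem.Str.find s "R"))).toList
          from rfl, htake, isIn_singleton]
    have h2 : PySem.Str.isIn "B" (PySem.Str.slice s (some (PySem.Str.find s "R")) none)
        = (((s.toList.dropWhile (· ≠ 'R')).tail).contains 'B') := by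
      rw [show PySem.Str.isIn "B" (PySem.Str.slice s (some (PySem.Str.find s "R")) none)
          = PySem.Chars.isIn ['B'] (PySem.Str.slice s (some (PySem.Str.find s "R")) none).toList
          from rfl, hdrop, isIn_singleton, List.contains_cons]
      simp
    rw [if_pos h, if_neg (show ¬((!PySem.Str.isIn "R" s) = true) by rw [hin]; simp)]
    simp only []
    rw [h1, h2]
    simp
  · have hnin : PySem.Str.isIn "R" s = false := by
      rw [hRstr, isIn_singleton]; simpa using h
    rw [if_neg h, if_pos (show (!PySem.Str.isIn "R" s) = true by rw [hnin]; rfl)]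
    simp
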